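-- pv_equiv track=rewrite | github.com/vulnerability-lookup/VulnTrain | vulntrain/trainers/hierarchy.py | build_hierarchy_levels
-- ===== SOURCE A (Python) =====
-- def build_hierarchy_levels(data):
--     hierarchy = {}
--     visited = set()
--
--     def dfs(node, level):
--         if node in visited:
--             return
--         visited.add(node)
--         hierarchy[node] = level
--         for child in data.get(node, []):
--             dfs(child, level + 1)
--
--     # Start DFS from each top-level node
--     for key in data:
--         dfs(key, 0)
--
--     return hierarchy
-- ===== SOURCE B (Python) =====
-- def build_hierarchy_levels(data):
--     order = []          # (node, level) pairs in first-visit preorder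
--     seen = set()
--     stack = [(key, 0) for key in reversed(data)]
--     while stack:
--         node, level = stack.pop()
--         if node not in seen:
--             seen.add(node)
--             order.append((node, level))
--             stack += [(child, level + 1) for child in reversed(data.get(node, []))]
--     return dict(order)
-- ===== Notes on version B (the rewrite author's own statement) =====
-- stated objective: alternative
-- what changed: Replaces A's recursive DFS that mutates a dict with an iterative explicit-stack DFS that accumulates the (node, level) pairs in a plain list in first-visit order and builds the dict once at the end; no nested function, no recursion, no per-node dict mutation.
import Mathlib
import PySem

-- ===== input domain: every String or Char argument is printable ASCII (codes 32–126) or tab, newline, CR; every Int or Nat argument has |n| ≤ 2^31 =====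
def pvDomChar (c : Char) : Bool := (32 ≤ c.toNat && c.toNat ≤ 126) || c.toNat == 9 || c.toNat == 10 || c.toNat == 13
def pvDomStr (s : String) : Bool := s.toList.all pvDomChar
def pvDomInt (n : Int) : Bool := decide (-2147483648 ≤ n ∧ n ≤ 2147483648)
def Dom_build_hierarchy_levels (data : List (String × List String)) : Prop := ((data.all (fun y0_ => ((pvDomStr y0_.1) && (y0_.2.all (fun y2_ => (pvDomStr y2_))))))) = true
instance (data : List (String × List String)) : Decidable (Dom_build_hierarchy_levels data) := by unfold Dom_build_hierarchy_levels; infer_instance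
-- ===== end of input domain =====

-- B replaces A's recursive dict-mutating DFS by an iterative explicit-stack DFS that
-- accumulates the (node, level) pairs in a plain list and builds the dict once at the end.

-- ===== PORT A =====
-- recursive dfs of A; the Nat argument is a fuel guard for totality only (the recursion
-- depth is bounded by the number of dict keys, so the fuel below never runs out)
def pvDfs (d : PySem.Dict String (List String)) :
    Nat → String → Int → PySem.Dict String Int × PySem.Set String →
    PySem.Dict String Int × PySem.Set String
  | 0, _, _, st => st
  | f + 1, node, level, st =>
    if node ∈ st.2 then st
    else
      let st1 := (st.1.insert node level, PySem.Set.add st.2 node)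
      (d.getD node []).foldl (fun s c => pvDfs d f c (level + 1) s) st1

def build_hierarchy_levels (data : List (String × List String)) : List (String × Int) :=
  let d := PySem.Dict.ofList data
  (d.keys.foldl (fun st k => pvDfs d (data.length + 1) k 0 st)
    (PySem.Dict.empty, PySem.Set.empty)).1.items

-- ===== PORT B =====
-- B's while loop. The Lean stack holds the Python stack REVERSED (Lean head = Python end,
-- where pop() and += act), so 'stack += [(c, l+1) for c in reversed(children)]' becomes
-- prepending 'children.map (fun c => (c, l+1))'. The Nat argument is a fuel guard for
-- totality only (each iteration pops one entry and the total number of pushes is bounded,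
-- so the fuel chosen below never runs out).
def pvBLoop (d : PySem.Dict String (List String)) :
    Nat → List (String × Int) → List (String × Int) → PySem.Set String →
    List (String × Int)
  | _, [], order, _ => order
  | 0, _ :: _, order, _ => order
  | f + 1, (node, level) :: rest, order, seen =>
    if node ∈ seen then pvBLoop d f rest order seen
    else
      pvBLoop d f ((d.getD node []).map (fun c => (c, level + 1)) ++ rest)
        (order ++ [(node, level)]) (PySem.Set.add seen node)

def build_hierarchy_levels_alt (data : List (String × List String)) : List (String × Int) :=
  let d := PySem.Dict.ofList data
  let fuel := d.keys.length + (d.keys.map (fun k => (d.getD k []).length)).sum + 1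
  (PySem.Dict.ofList
    (pvBLoop d fuel (d.keys.map (fun k => (k, 0))) [] PySem.Set.empty)).items

-- ===== PRECONDITION & SPEC =====
def Spec_build_hierarchy_levels (data : List (String × List String)) (out : List (String × Int)) : Prop := out = build_hierarchy_levels_alt data
instance (data : List (String × List String)) (out : List (String × Int)) : Decidable (Spec_build_hierarchy_levels data out) := by unfold Spec_build_hierarchy_levels; infer_instance

-- ===== CLAIM (what is proved, stated in full; the proofs are below) =====
def Claim_equal_build_hierarchy_levels : Prop := ∀ (data : List (String × List String)), Dom_build_hierarchy_levels data → Spec_build_hierarchy_levels data (build_hierarchy_levels data)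

-- ===== LEMMAS AND PROOFS =====

-- proof-only intermediate: the same stack loop as pvBLoop but carrying A's (dict, visited)
-- state, the bridge between A's recursion and B's list accumulator
def pvLoopD (d : PySem.Dict String (List String)) :
    Nat → List (String × Int) → PySem.Dict String Int × PySem.Set String →
    PySem.Dict String Int × PySem.Set String
  | _, [], st => st
  | 0, _ :: _, st => st
  | f + 1, (node, level) :: rest, st =>
    if node ∈ st.2 then pvLoopD d f rest st
    else
      pvLoopD d f ((d.getD node []).map (fun c => (c, level + 1)) ++ rest)
        (st.1.insert node level, PySem.Set.add st.2 node)

-- the dict keys not yet visited; its length (pvMu) bounds A's recursion depth, and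
-- pvSg bounds the number of remaining iterations of the stack loop
def pvUnv (d : PySem.Dict String (List String)) (v : PySem.Set String) : List String :=
  d.keys.filter (fun k => !decide (k ∈ v))

def pvMu (d : PySem.Dict String (List String)) (v : PySem.Set String) : Nat :=
  (pvUnv d v).length

def pvSg (d : PySem.Dict String (List String)) (stack : List (String × Int))
    (v : PySem.Set String) : Nat :=
  stack.length + ((pvUnv d v).map (fun k => (d.getD k []).length)).sum

-- fuel-saturated versions used only in the proofs
def pvDfsS (d : PySem.Dict String (List String)) (node : String) (level : Int)
    (st : PySem.Dict String Int × PySem.Set String) :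
    PySem.Dict String Int × PySem.Set String :=
  pvDfs d (pvMu d st.2 + 1) node level st

def pvLoopS (d : PySem.Dict String (List String)) (stack : List (String × Int))
    (st : PySem.Dict String Int × PySem.Set String) :
    PySem.Dict String Int × PySem.Set String :=
  pvLoopD d (pvSg d stack st.2 + 1) stack st

theorem pvDfs_mono (d : PySem.Dict String (List String)) :
    ∀ (f : Nat) (n : String) (l : Int) st (x : String),
      x ∈ st.2 → x ∈ (pvDfs d f n l st).2 := by
  intro f
  induction f with
  | zero => intro n l st x h; simpa [pvDfs] using h
  | succ f ih =>
    intro n l st x h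
    rw [pvDfs]
    split
    · exact h
    · show x ∈ ((d.getD n []).foldl (fun s c => pvDfs d f c (l + 1) s)
          (st.1.insert n l, PySem.Set.add st.2 n)).2
      have hx : x ∈ (st.1.insert n l, PySem.Set.add st.2 n).2 :=
        (PySem.Set.mem_add st.2 n x).mpr (Or.inl h)
      generalize (st.1.insert n l, PySem.Set.add st.2 n) = st1 at hx ⊢
      generalize d.getD n [] = cs0
      revert hx
      induction cs0 generalizing st1 with
      | nil => intro hx; exact hx
      | cons c cs ihc =>
        intro hx
        simp only [List.foldl_cons]
        exact ihc (pvDfs d f c (l + 1) st1) (ih c (l + 1) st1 x hx)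

theorem pvMu_mono_dfs (d : PySem.Dict String (List String)) (f : Nat) (n : String) (l : Int) st :
    pvMu d (pvDfs d f n l st).2 ≤ pvMu d st.2 := by
  unfold pvMu pvUnv
  simp only [← List.countP_eq_length_filter]
  apply List.countP_mono_left
  intro k _ hk
  simp only [Bool.not_eq_eq_eq_not, Bool.not_true, decide_eq_false_iff_not] at hk ⊢
  intro hmem
  exact hk (pvDfs_mono d f n l st k hmem)

theorem pvGetD_not_key (d : PySem.Dict String (List String)) (n : String) (h : n ∉ d.keys) :
    d.getD n [] = [] := by
  apply PySem.Dict.getD_of_not_contains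
  by_contra hc
  exact h ((PySem.Dict.contains_iff_mem_keys d n).mp (by revert hc; cases d.contains n <;> simp))

theorem pvUnv_add (d : PySem.Dict String (List String)) (v : PySem.Set String) (n : String) :
    pvUnv d (PySem.Set.add v n) = (pvUnv d v).filter (fun k => !(k == n)) := by
  unfold pvUnv
  rw [List.filter_filter]
  apply List.filter_congr
  intro k _
  have hiff : (k ∈ PySem.Set.add v n) ↔ (k ∈ v ∨ k = n) := PySem.Set.mem_add v n k
  by_cases h1 : k ∈ v <;> by_cases h2 : k = n <;> simp [hiff, h1, h2]

theorem pvNodup_unv (d : PySem.Dict String (List String)) (hnd : d.keys.Nodup)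
    (v : PySem.Set String) : (pvUnv d v).Nodup :=
  hnd.filter _

theorem pvFilter_ne_not_mem {m : List String} {n : String} (hn : n ∉ m) :
    m.filter (fun k => !(k == n)) = m :=
  List.filter_eq_self.mpr (fun b hb => by
    simp only [Bool.not_eq_eq_eq_not, Bool.not_true, beq_eq_false_iff_ne, ne_eq]
    exact fun e => hn (e ▸ hb))

theorem pvLen_filter_ne {m : List String} (hnd : m.Nodup) {n : String} (hn : n ∈ m) :
    m.length = (m.filter (fun k => !(k == n))).length + 1 := by
  induction m with
  | nil => cases hn
  | cons a m ih =>
    rcases List.nodup_cons.mp hnd with ⟨ha, hm⟩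
    rcases List.mem_cons.mp hn with rfl | hn2
    · simp [pvFilter_ne_not_mem ha]
    · have hne : (a == n) = false := beq_eq_false_iff_ne.mpr (fun e => ha (e ▸ hn2))
      simp only [List.filter_cons, hne, Bool.not_false, if_true, List.length_cons]
      have := ih hm hn2
      omega

theorem pvSum_filter_ne {m : List String} (hnd : m.Nodup) {n : String} (hn : n ∈ m)
    (w : String → Nat) :
    (m.map w).sum = ((m.filter (fun k => !(k == n))).map w).sum + w n := by
  induction m with
  | nil => cases hn
  | cons a m ih =>
    rcases List.nodup_cons.mp hnd with ⟨ha, hm⟩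
    rcases List.mem_cons.mp hn with rfl | hn2
    · simp [pvFilter_ne_not_mem ha, Nat.add_comm]
    · have hne : (a == n) = false := beq_eq_false_iff_ne.mpr (fun e => ha (e ▸ hn2))
      simp only [List.filter_cons, hne, Bool.not_false, if_true, List.map_cons, List.sum_cons]
      have := ih hm hn2
      omega

theorem pvMem_unv (d : PySem.Dict String (List String)) (v : PySem.Set String) (n : String)
    (hk : n ∈ d.keys) (hv : n ∉ v) : n ∈ pvUnv d v := by
  unfold pvUnv
  rw [List.mem_filter]
  exact ⟨hk, by simpa using hv⟩

-- pvMu drops by exactly one when an unvisited key is marked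
theorem pvMu_step (d : PySem.Dict String (List String)) (hnd : d.keys.Nodup)
    (v : PySem.Set String) (n : String) (hk : n ∈ d.keys) (hv : n ∉ v) :
    pvMu d v = pvMu d (PySem.Set.add v n) + 1 := by
  rw [pvMu, pvMu, pvUnv_add]
  exact pvLen_filter_ne (pvNodup_unv d hnd v) (pvMem_unv d v n hk hv)

theorem pvNot_mem_unv (d : PySem.Dict String (List String)) (v : PySem.Set String)
    (n : String) (hk : n ∉ d.keys) : n ∉ pvUnv d v := by
  unfold pvUnv
  rw [List.mem_filter]
  exact fun h => hk h.1

theorem pvMu_pos (d : PySem.Dict String (List String)) (v : PySem.Set String) (n : String)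
    (hk : n ∈ d.keys) (hv : n ∉ v) : 1 ≤ pvMu d v :=
  List.length_pos_of_mem (pvMem_unv d v n hk hv)

-- fuel irrelevance for A's dfs
theorem pvDfs_irrel (d : PySem.Dict String (List String)) (hnd : d.keys.Nodup) :
    ∀ (f1 f2 : Nat) (n : String) (l : Int) st,
      pvMu d st.2 < f1 → pvMu d st.2 < f2 → pvDfs d f1 n l st = pvDfs d f2 n l st := by
  intro f1
  induction f1 with
  | zero => intro f2 n l st h1; omega
  | succ f1 ih =>
    intro f2 n l st h1 h2
    match f2, h2 with
    | f2 + 1, h2 =>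
      rw [pvDfs, pvDfs]
      split
      · rfl
      · rename_i hnv
        by_cases hk : n ∈ d.keys
        · have hstep := pvMu_step d hnd st.2 n hk hnv
          have hmu1 : pvMu d (PySem.Set.add st.2 n) < f1 := by omega
          have hmu2 : pvMu d (PySem.Set.add st.2 n) < f2 := by omega
          generalize hst1 : (st.1.insert n l, PySem.Set.add st.2 n) = st1
          have hmu1' : pvMu d st1.2 < f1 := by rw [← hst1]; exact hmu1
          have hmu2' : pvMu d st1.2 < f2 := by rw [← hst1]; exact hmu2
          clear hst1 hstep hmu1 hmu2 h1 h2 hnv hk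
          induction (d.getD n []) generalizing st1 with
          | nil => rfl
          | cons c cs ihc =>
            simp only [List.foldl_cons]
            rw [ih f2 c (l + 1) st1 hmu1' hmu2']
            have hm : pvMu d (pvDfs d f2 c (l + 1) st1).2 ≤ pvMu d st1.2 :=
              pvMu_mono_dfs d f2 c (l + 1) st1
            exact ihc _ (by omega) (by omega)
        · rw [pvGetD_not_key d n hk]; rfl

theorem pvFoldl_dfs_eq (d : PySem.Dict String (List String)) (hnd : d.keys.Nodup) :
    ∀ (cs : List String) (lv : Int) st (b : Nat), pvMu d st.2 < b →
      cs.foldl (fun s c => pvDfs d b c lv s) st = cs.foldl (fun s c => pvDfsS d c lv s) st := by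
  intro cs
  induction cs with
  | nil => intros; rfl
  | cons c cs ih =>
    intro lv st b hb
    simp only [List.foldl_cons]
    rw [pvDfs_irrel d hnd b (pvMu d st.2 + 1) c lv st hb (Nat.lt_succ_self _)]
    have hm : pvMu d (pvDfsS d c lv st).2 ≤ pvMu d st.2 := pvMu_mono_dfs d _ c lv st
    rw [← pvDfsS]
    exact ih lv (pvDfsS d c lv st) b (by omega)

theorem pvDfsS_visited (d : PySem.Dict String (List String)) (n : String) (l : Int) st
    (h : n ∈ st.2) : pvDfsS d n l st = st := by
  rw [pvDfsS, pvDfs, if_pos h]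

theorem pvDfsS_new (d : PySem.Dict String (List String)) (hnd : d.keys.Nodup)
    (n : String) (l : Int) st (h : n ∉ st.2) :
    pvDfsS d n l st =
      (d.getD n []).foldl (fun s c => pvDfsS d c (l + 1) s)
        (st.1.insert n l, PySem.Set.add st.2 n) := by
  rw [pvDfsS, pvDfs, if_neg h]
  by_cases hk : n ∈ d.keys
  · have hstep := pvMu_step d hnd st.2 n hk h
    exact pvFoldl_dfs_eq d hnd _ (l + 1) _ (pvMu d st.2) (by simp [hstep])
  · rw [pvGetD_not_key d n hk]; rfl

theorem pvMu_mono_dfsS (d : PySem.Dict String (List String)) (n : String) (l : Int) st :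
    pvMu d (pvDfsS d n l st).2 ≤ pvMu d st.2 := pvMu_mono_dfs d _ n l st

-- one stack step shrinks pvSg by exactly one
theorem pvSg_step_visited (d : PySem.Dict String (List String)) (n : String) (l : Int)
    (rest : List (String × Int)) (v : PySem.Set String) :
    pvSg d ((n, l) :: rest) v = pvSg d rest v + 1 := by
  simp [pvSg]; omega

theorem pvSg_step_new (d : PySem.Dict String (List String)) (hnd : d.keys.Nodup)
    (n : String) (l : Int) (rest : List (String × Int)) (v : PySem.Set String) (hv : n ∉ v) :
    pvSg d ((n, l) :: rest) v =
      pvSg d ((d.getD n []).map (fun c => (c, l + 1)) ++ rest) (PySem.Set.add v n) + 1 := by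
  unfold pvSg
  rw [pvUnv_add]
  by_cases hk : n ∈ d.keys
  · have hsum := pvSum_filter_ne (pvNodup_unv d hnd v) (pvMem_unv d v n hk hv)
      (fun k => (d.getD k []).length)
    simp only [List.length_append, List.length_map, List.length_cons]
    omega
  · rw [pvGetD_not_key d n hk, pvFilter_ne_not_mem (pvNot_mem_unv d v n hk)]
    simp
    omega

-- fuel irrelevance for the dict-state stack loop
theorem pvLoopD_irrel (d : PySem.Dict String (List String)) (hnd : d.keys.Nodup) :
    ∀ (f1 f2 : Nat) (stack : List (String × Int)) st,
      pvSg d stack st.2 < f1 → pvSg d stack st.2 < f2 →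
      pvLoopD d f1 stack st = pvLoopD d f2 stack st := by
  intro f1
  induction f1 with
  | zero => intro f2 stack st h1; omega
  | succ f1 ih =>
    intro f2 stack st h1 h2
    match stack with
    | [] => rw [pvLoopD, pvLoopD]
    | (n, lv) :: rest =>
      match f2, h2 with
      | f2 + 1, h2 =>
        rw [pvLoopD, pvLoopD]
        split
        · have := pvSg_step_visited d n lv rest st.2
          exact ih f2 rest st (by omega) (by omega)
        · rename_i hnv
          have := pvSg_step_new d hnd n lv rest st.2 hnv
          exact ih f2 _ _ (by simpa using by omega) (by simpa using by omega)

theorem pvLoopD_eq_loopS (d : PySem.Dict String (List String)) (hnd : d.keys.Nodup) (f : Nat)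
    (stack : List (String × Int)) st (h : pvSg d stack st.2 < f) :
    pvLoopD d f stack st = pvLoopS d stack st :=
  pvLoopD_irrel d hnd f _ stack st h (Nat.lt_succ_self _)

theorem pvLoopS_nil (d : PySem.Dict String (List String)) st : pvLoopS d [] st = st := rfl

theorem pvLoopS_cons_visited (d : PySem.Dict String (List String)) (hnd : d.keys.Nodup)
    (n : String) (l : Int) (rest : List (String × Int)) st (h : n ∈ st.2) :
    pvLoopS d ((n, l) :: rest) st = pvLoopS d rest st := by
  rw [pvLoopS, pvLoopD, if_pos h]
  exact pvLoopD_eq_loopS d hnd _ rest st (by rw [pvSg_step_visited]; omega)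

theorem pvLoopS_cons_new (d : PySem.Dict String (List String)) (hnd : d.keys.Nodup)
    (n : String) (l : Int) (rest : List (String × Int)) st (h : n ∉ st.2) :
    pvLoopS d ((n, l) :: rest) st =
      pvLoopS d ((d.getD n []).map (fun c => (c, l + 1)) ++ rest)
        (st.1.insert n l, PySem.Set.add st.2 n) := by
  rw [pvLoopS, pvLoopD, if_neg h]
  have := pvSg_step_new d hnd n l rest st.2 h
  exact pvLoopD_eq_loopS d hnd _ _ _ (by simp only []; omega)

-- the heart of the A-side proof: popping one stack entry is running A's dfs on it
theorem pvMain (d : PySem.Dict String (List String)) (hnd : d.keys.Nodup) :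
    ∀ (k : Nat),
      (∀ st, pvMu d st.2 ≤ k → ∀ (n : String) (l : Int) rest,
        pvLoopS d ((n, l) :: rest) st = pvLoopS d rest (pvDfsS d n l st)) ∧
      (∀ st, pvMu d st.2 ≤ k → ∀ (lv : Int) (cs : List String) rest,
        pvLoopS d (cs.map (fun c => (c, lv)) ++ rest) st =
          pvLoopS d rest (cs.foldl (fun s c => pvDfsS d c lv s) st)) := by
  intro k
  induction k using Nat.strong_induction_on with
  | _ k ih =>
    have hG : ∀ st, pvMu d st.2 ≤ k → ∀ (n : String) (l : Int) rest,
        pvLoopS d ((n, l) :: rest) st = pvLoopS d rest (pvDfsS d n l st) := by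
      intro st hk n l rest
      by_cases h : n ∈ st.2
      · rw [pvLoopS_cons_visited d hnd n l rest st h, pvDfsS_visited d n l st h]
      · rw [pvLoopS_cons_new d hnd n l rest st h, pvDfsS_new d hnd n l st h]
        by_cases hkey : n ∈ d.keys
        · have hstep := pvMu_step d hnd st.2 n hkey h
          have hpos := pvMu_pos d st.2 n hkey h
          have hlt : pvMu d (PySem.Set.add st.2 n) < k := by omega
          exact (ih (pvMu d (PySem.Set.add st.2 n)) hlt).2
            (st.1.insert n l, PySem.Set.add st.2 n) (le_refl _) (l + 1) (d.getD n []) rest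
        · rw [pvGetD_not_key d n hkey]
          rfl
    have hG' : ∀ (cs : List String) (lv : Int) st rest, pvMu d st.2 ≤ k →
        pvLoopS d (cs.map (fun c => (c, lv)) ++ rest) st =
          pvLoopS d rest (cs.foldl (fun s c => pvDfsS d c lv s) st) := by
      intro cs
      induction cs with
      | nil => intro lv st rest _; rfl
      | cons c cs ihc =>
        intro lv st rest hmu
        simp only [List.map_cons, List.cons_append, List.foldl_cons]
        rw [hG st hmu c lv _]
        exact ihc lv (pvDfsS d c lv st) rest (le_trans (pvMu_mono_dfsS d c lv st) hmu)
    exact ⟨hG, fun st hmu lv cs rest => hG' cs lv st rest hmu⟩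

-- lockstep: B's list-accumulator loop computes exactly the items of the dict-state loop
theorem pvLock (d : PySem.Dict String (List String)) :
    ∀ (f : Nat) (stack : List (String × Int)) (st : PySem.Dict String Int × PySem.Set String),
      (∀ k, st.1.contains k = true ↔ k ∈ st.2) →
      pvBLoop d f stack st.1.items st.2 = (pvLoopD d f stack st).1.items := by
  intro f
  induction f with
  | zero =>
    intro stack st _
    cases stack with
    | nil => rw [pvBLoop, pvLoopD]
    | cons p rest => cases p; rw [pvBLoop, pvLoopD]
  | succ f ih =>
    intro stack st hinv
    cases stack with
    | nil => rw [pvBLoop, pvLoopD]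
    | cons p rest =>
      cases p with
      | mk n l =>
        rw [pvBLoop, pvLoopD]
        by_cases h : n ∈ st.2
        · rw [if_pos h, if_pos h]
          exact ih rest st hinv
        · rw [if_neg h, if_neg h]
          have hc : st.1.contains n = false := by
            cases hcn : st.1.contains n
            · rfl
            · exact absurd ((hinv n).mp hcn) h
          have hitems : (st.1.insert n l).items = st.1.items ++ [(n, l)] :=
            PySem.Dict.items_insert_of_not_contains st.1 l hc
          have hinv' : ∀ k, (st.1.insert n l).contains k = true ↔ k ∈ PySem.Set.add st.2 n := by
            intro k
            rw [PySem.Dict.contains_insert, PySem.Set.mem_add]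
            constructor
            · intro hk
              rcases Bool.or_eq_true_iff.mp hk with hk | hk
              · exact Or.inr (eq_of_beq hk)
              · exact Or.inl ((hinv k).mp hk)
            · intro hk
              rcases hk with hk | hk
              · exact Bool.or_eq_true_iff.mpr (Or.inr ((hinv k).mpr hk))
              · exact Bool.or_eq_true_iff.mpr (Or.inl (beq_iff_eq.mpr hk))
          have := ih ((d.getD n []).map (fun c => (c, l + 1)) ++ rest)
            (st.1.insert n l, PySem.Set.add st.2 n) hinv'
          rw [← this, hitems]

-- keys of the dict-state loop's result stay Nodup
theorem pvLoopD_nodup (d : PySem.Dict String (List String)) :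
    ∀ (f : Nat) (stack : List (String × Int)) st,
      st.1.keys.Nodup → (pvLoopD d f stack st).1.keys.Nodup := by
  intro f
  induction f with
  | zero =>
    intro stack st h
    cases stack with
    | nil => rw [pvLoopD]; exact h
    | cons p rest => cases p; rw [pvLoopD]; exact h
  | succ f ih =>
    intro stack st h
    cases stack with
    | nil => rw [pvLoopD]; exact h
    | cons p rest =>
      cases p with
      | mk n l =>
        rw [pvLoopD]
        by_cases hv : n ∈ st.2
        · rw [if_pos hv]; exact ih rest st h
        · rw [if_neg hv]
          exact ih _ _ (PySem.Dict.nodup_keys_insert st.1 n l h)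

-- dict(order) on a list with distinct keys has exactly that items list
theorem pvOfList_items {L : List (String × Int)} (h : (L.map Prod.fst).Nodup) :
    (PySem.Dict.ofList L).items = L := by
  have hd : PySem.Dict.ofList L
      = List.foldl (fun d (x : String × Int) => d.insert x.1 x.2) PySem.Dict.empty L := rfl
  rw [hd]
  have := PySem.Dict.items_foldl_insert_fresh L Prod.fst Prod.snd PySem.Dict.empty
    (fun a _ => PySem.Dict.contains_empty a.1) h
  simpa using this

-- facts about the common starting state
theorem pvKeys_ofList (data : List (String × List String)) :
    (PySem.Dict.ofList data).keys = PySem.Set.ofList (data.map Prod.fst) := by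
  have h : PySem.Dict.ofList data
      = List.foldl (fun d (x : String × List String) => d.insert x.1 x.2) PySem.Dict.empty data := rfl
  rw [h, PySem.Dict.keys_foldl_insert_key data Prod.fst (fun _ x => x.2)]
  rw [PySem.Dict.keys_empty]
  exact rfl

theorem pvNodup_keys_ofList (data : List (String × List String)) :
    (PySem.Dict.ofList data).keys.Nodup :=
  PySem.Dict.nodup_keys_update PySem.Dict.empty data
    (by rw [PySem.Dict.keys_empty]; exact List.nodup_nil)

theorem pvUnv_empty (d : PySem.Dict String (List String)) :
    pvUnv d PySem.Set.empty = d.keys := by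
  unfold pvUnv
  apply List.filter_eq_self.mpr
  intro a _
  simp [PySem.Set.empty]

-- ===== VERDICT (by name: the statement is the Claim_ definition above) =====
theorem build_hierarchy_levels_spec : Claim_equal_build_hierarchy_levels := by
  unfold Claim_equal_build_hierarchy_levels
  intro data _
  unfold Spec_build_hierarchy_levels build_hierarchy_levels build_hierarchy_levels_alt
  show ((PySem.Dict.ofList data).keys.foldl
      (fun st k => pvDfs (PySem.Dict.ofList data) (data.length + 1) k 0 st)
      (PySem.Dict.empty, PySem.Set.empty)).1.items
    = (PySem.Dict.ofList (pvBLoop (PySem.Dict.ofList data)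
        ((PySem.Dict.ofList data).keys.length
          + ((PySem.Dict.ofList data).keys.map
              (fun k => ((PySem.Dict.ofList data).getD k []).length)).sum + 1)
        ((PySem.Dict.ofList data).keys.map (fun k => (k, 0))) [] PySem.Set.empty)).items
  generalize hd : PySem.Dict.ofList data = d
  have hnd : d.keys.Nodup := hd ▸ pvNodup_keys_ofList data
  have hklen : d.keys.length ≤ data.length := by
    rw [← hd, pvKeys_ofList data]
    exact le_trans (PySem.Set.length_ofList_le _) (by rw [List.length_map])
  have hmu0 : pvMu d (PySem.Set.empty : PySem.Set String) = d.keys.length := by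
    rw [pvMu, pvUnv_empty]
  have hA : d.keys.foldl (fun st k => pvDfs d (data.length + 1) k 0 st)
        (PySem.Dict.empty, PySem.Set.empty)
      = d.keys.foldl (fun s c => pvDfsS d c 0 s) (PySem.Dict.empty, PySem.Set.empty) :=
    pvFoldl_dfs_eq d hnd d.keys 0 (PySem.Dict.empty, PySem.Set.empty) (data.length + 1)
      (by show pvMu d (PySem.Set.empty : PySem.Set String) < data.length + 1; omega)
  set fuel := d.keys.length + (d.keys.map (fun k => (d.getD k []).length)).sum + 1 with hfueldef
  have hfuel : fuel = pvSg d (d.keys.map (fun k => (k, 0))) (PySem.Set.empty : PySem.Set String) + 1 := by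
    rw [hfueldef, pvSg, pvUnv_empty, List.length_map]
  have hinv0 : ∀ k, (PySem.Dict.empty : PySem.Dict String Int).contains k = true ↔
      k ∈ (PySem.Set.empty : PySem.Set String) := by
    intro k
    rw [PySem.Dict.contains_empty]
    simp [PySem.Set.empty]
  have hlock := pvLock d fuel (d.keys.map (fun k => (k, 0)))
    (PySem.Dict.empty, PySem.Set.empty) hinv0
  have hBitems : pvBLoop d fuel (d.keys.map (fun k => (k, 0))) [] PySem.Set.empty
      = (pvLoopD d fuel (d.keys.map (fun k => (k, 0))) (PySem.Dict.empty, PySem.Set.empty)).1.items := by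
    have he : (PySem.Dict.empty : PySem.Dict String Int).items = [] := rfl
    rw [← he]
    exact hlock
  have hndres : (pvLoopD d fuel (d.keys.map (fun k => (k, 0)))
      (PySem.Dict.empty, PySem.Set.empty)).1.keys.Nodup :=
    pvLoopD_nodup d fuel _ _ (by rw [PySem.Dict.keys_empty]; exact List.nodup_nil)
  rw [hBitems, pvOfList_items (by simpa [PySem.Dict.keys] using hndres)]
  have hDS : pvLoopD d fuel (d.keys.map (fun k => (k, 0))) (PySem.Dict.empty, PySem.Set.empty)
      = pvLoopS d (d.keys.map (fun k => (k, 0))) (PySem.Dict.empty, PySem.Set.empty) :=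
    pvLoopD_eq_loopS d hnd fuel _ _ (by rw [hfuel]; exact Nat.lt_succ_self _)
  have hmain := (pvMain d hnd (pvMu d (PySem.Set.empty : PySem.Set String))).2
    (PySem.Dict.empty, PySem.Set.empty) (le_refl _) 0 d.keys []
  rw [List.append_nil, pvLoopS_nil] at hmain
  rw [hA, hDS, hmain]
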